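-- pv_equiv track=rewrite | github.com/Kopiks/g_quad | hunter.py | ntScore
-- ===== SOURCE A (Python) =====
-- def ntScore(seq):
-- 	"""
-- 	Give each position in a sequence a score based on a pattern:
-- 	+1 for a single G
-- 	+2 for every G in a double G-tract
-- 	+3 for every G in a triple G-tract
-- 	+4 for every G in a quadruple or more G-tract
-- 	For C's it's analogous, but the values are negative
-- 	A,T gets 0 every time
-- 	raw sequence as an input, returns list of scores for every nt
-- 	"""
-- 	score =[0]*len(seq) 	#predefined score table
-- 	idx=0 		#iterator index
-- 	while idx < len(seq):
-- 		if seq[idx] =='G':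
-- 			g_row = 0 		#number of G's in a row -1 (0-based)
-- 			k=idx+1			#iterator, starting from base after G
-- 			while k < len(seq) :		#length of a G-tract
-- 				if seq[k] == 'G':
-- 					g_row += 1
-- 					k+=1
-- 				else: break
-- 			if g_row < 3:		#scoring for 1,2 and 3 G-tract
-- 				for n in range (g_row + 1):
-- 					score[idx + n] = g_row + 1
-- 				idx += g_row+1			# skip to first base after G-tract
-- 			else:
-- 				for n in range(g_row + 1):		#scoring for 4+
-- 					score[idx + n] = 4
-- 				idx += g_row+1
-- 		elif seq[idx] =='C':		#C scoring, analogous to G scoring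
-- 			c_row = 0
-- 			k=idx+1
-- 			while k < len(seq):
-- 				if seq[k] == 'C':
-- 					c_row += 1
-- 					k+=1
-- 				else: break
-- 			if c_row < 3:
-- 				for n in range (c_row + 1):
-- 					score[idx + n] = -(c_row + 1)
-- 				idx += c_row+1
--
--
-- 			else:
-- 				for n in range(c_row + 1):
-- 					score[idx + n] = -4
-- 				idx += c_row+1
-- 		else:					#score for T's and A's (and N's or similar)
-- 			score[idx] = 0
-- 			idx += 1
-- 	return score
-- ===== SOURCE B (Python) =====
-- def ntScore(seq):
--     # Two-phase: fold the sequence into (char, run-length) pairs, then expand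
--     # each run to min(L,4)-capped scores; no index cursor or peek-ahead.
--     runs = []
--     for ch in seq:
--         if runs and runs[-1][0] == ch:
--             runs[-1][1] += 1
--         else:
--             runs.append([ch, 1])
--     out = []
--     for ch, L in runs:
--         cap = min(L, 4)
--         out.extend([cap if ch == 'G' else -cap if ch == 'C' else 0] * L)
--     return out
-- ===== Notes on version B (the rewrite author's own statement) =====
-- stated objective: simpler
-- what changed: Replaced the index-cursor scan with per-character peek-ahead while-loops, manual idx jumps and in-place writes into a preallocated score table by a two-phase decomposition: one fold groups the sequence into (char, run-length) pairs, then each run is expanded to a min(L,4)-capped score block and the blocks are concatenated.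
import Mathlib
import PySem

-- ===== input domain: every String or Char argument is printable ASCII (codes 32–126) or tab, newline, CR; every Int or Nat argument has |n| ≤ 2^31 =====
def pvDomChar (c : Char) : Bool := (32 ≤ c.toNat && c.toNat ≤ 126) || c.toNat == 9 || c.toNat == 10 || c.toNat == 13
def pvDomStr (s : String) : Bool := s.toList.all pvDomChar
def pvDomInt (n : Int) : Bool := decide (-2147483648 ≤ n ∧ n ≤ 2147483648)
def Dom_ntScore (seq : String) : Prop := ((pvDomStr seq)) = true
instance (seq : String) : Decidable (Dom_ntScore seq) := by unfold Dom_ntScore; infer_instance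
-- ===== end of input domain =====

-- B replaces A's index-cursor/peek-ahead/table-write scan by a run-grouping fold plus
-- expansion of each run to a min(L,4)-capped block; return values are identical.

-- ===== PORT A =====
-- inner while of A: counts consecutive characters equal to c starting at position k
def ntScoreRun (s : List Char) (c : Char) (k : Nat) : Nat :=
  if h : k < s.length then
    if s[k] = c then ntScoreRun s c (k + 1) + 1 else 0
  else 0
termination_by s.length - k

-- outer while of A: score table, cursor idx, per-branch for-loops writing the block
def ntScoreLoop (s : List Char) (score : List Int) (idx : Nat) : List Int :=
  if h : idx < s.length then
    if s[idx] = 'G' then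
      if ntScoreRun s 'G' (idx + 1) < 3 then
        ntScoreLoop s ((List.range (ntScoreRun s 'G' (idx + 1) + 1)).foldl
          (fun sc n => sc.set (idx + n) ((ntScoreRun s 'G' (idx + 1) : Int) + 1)) score)
          (idx + ntScoreRun s 'G' (idx + 1) + 1)
      else
        ntScoreLoop s ((List.range (ntScoreRun s 'G' (idx + 1) + 1)).foldl
          (fun sc n => sc.set (idx + n) 4) score) (idx + ntScoreRun s 'G' (idx + 1) + 1)
    else if s[idx] = 'C' then
      if ntScoreRun s 'C' (idx + 1) < 3 then
        ntScoreLoop s ((List.range (ntScoreRun s 'C' (idx + 1) + 1)).foldl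
          (fun sc n => sc.set (idx + n) (-((ntScoreRun s 'C' (idx + 1) : Int) + 1))) score)
          (idx + ntScoreRun s 'C' (idx + 1) + 1)
      else
        ntScoreLoop s ((List.range (ntScoreRun s 'C' (idx + 1) + 1)).foldl
          (fun sc n => sc.set (idx + n) (-4)) score) (idx + ntScoreRun s 'C' (idx + 1) + 1)
    else
      ntScoreLoop s (score.set idx 0) (idx + 1)
  else score
termination_by s.length - idx

def ntScore (seq : String) : List Int :=
  ntScoreLoop seq.toList (List.replicate seq.toList.length 0) 0

-- ===== PORT B =====
-- first loop of B: fold each character into the run list (extend last run or append new)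
def ntScoreStep (runs : List (Char × Nat)) (ch : Char) : List (Char × Nat) :=
  match runs.getLast? with
  | some (c, n) => if c = ch then runs.dropLast ++ [(c, n + 1)] else runs ++ [(ch, 1)]
  | none => runs ++ [(ch, 1)]

def ntScore_alt (seq : String) : List Int :=
  let runs := seq.toList.foldl ntScoreStep []
  runs.foldl (fun out r =>
    let cap : Int := min (r.2 : Int) 4
    out ++ List.replicate r.2 (if r.1 = 'G' then cap else if r.1 = 'C' then -cap else 0)) []

-- ===== PRECONDITION & SPEC =====
def Spec_ntScore (seq : String) (out : List Int) : Prop := out = ntScore_alt seq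
instance (seq : String) (out : List Int) : Decidable (Spec_ntScore seq out) := by unfold Spec_ntScore; infer_instance

-- ===== CLAIM (what is proved, stated in full; the proofs are below) =====
def Claim_equal_ntScore : Prop := ∀ (seq : String), Dom_ntScore seq → Spec_ntScore seq (ntScore seq)

-- ===== LEMMAS AND PROOFS =====

-- canonical run decomposition of a character list
def runDecomp : List Char → List (Char × Nat)
  | [] => []
  | c :: rest =>
      (c, 1 + (rest.takeWhile (· == c)).length) :: runDecomp (rest.dropWhile (· == c))
termination_by l => l.length
decreasing_by simp; exact List.length_dropWhile_le _ _

def runBlock (r : Char × Nat) : List Int :=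
  List.replicate r.2 (if r.1 = 'G' then min (r.2 : Int) 4 else if r.1 = 'C' then -(min (r.2 : Int) 4) else 0)


-- run length of ntScoreRun as takeWhile of the tail
lemma ntScoreRun_eq (s : List Char) (c : Char) (k : Nat) :
    ntScoreRun s c k = ((s.drop k).takeWhile (· == c)).length := by
  induction k using ntScoreRun.induct (s := s) (c := c) with
  | case1 k h heq ih =>
      rw [ntScoreRun, dif_pos h, if_pos heq, ih,
        List.drop_eq_getElem_cons h, List.takeWhile_cons]
      simp [heq]
  | case2 k h heq =>
      rw [ntScoreRun, dif_pos h, if_neg heq,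
        List.drop_eq_getElem_cons h, List.takeWhile_cons]
      simp [heq]
  | case3 k h =>
      rw [ntScoreRun, dif_neg h, List.drop_eq_nil_of_le (by omega)]
      simp

lemma length_takeWhile_le' (p : Char → Bool) (l : List Char) :
    (l.takeWhile p).length ≤ l.length :=
  (List.takeWhile_sublist p).length_le

lemma dropWhile_eq_drop' (p : Char → Bool) (l : List Char) :
    l.dropWhile p = l.drop (l.takeWhile p).length := by
  have h := List.drop_left (l₁ := l.takeWhile p) (l₂ := l.dropWhile p)
  rw [List.takeWhile_append_dropWhile] at h
  exact h.symm

-- the for-loop of A writing v into positions idx..idx+m-1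
lemma foldl_set_range (score : List Int) (idx m : Nat) (v : Int) (h : idx + m ≤ score.length) :
    (List.range m).foldl (fun sc n => sc.set (idx + n) v) score
      = score.take idx ++ List.replicate m v ++ score.drop (idx + m) := by
  induction m with
  | zero => simp
  | succ m ih =>
      rw [List.range_succ, List.foldl_append, ih (by omega)]
      simp only [List.foldl_cons, List.foldl_nil]
      have h1 : idx + m < score.length := by omega
      have hlen : (score.take idx ++ List.replicate m v).length = idx + m := by
        simp [List.length_take]; omega
      rw [List.set_append_right _ _ hlen.le, hlen, Nat.sub_self,
        List.drop_eq_getElem_cons h1, List.set_cons_zero, List.replicate_succ']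
      simp [List.append_assoc]
      omega

-- a non-G/C head contributes a single 0
lemma runDecomp_flat_other (c : Char) (rest : List Char) (hg : c ≠ 'G') (hc : c ≠ 'C') :
    (runDecomp (c :: rest)).flatMap runBlock = 0 :: (runDecomp rest).flatMap runBlock := by
  cases rest with
  | nil => simp [runDecomp, runBlock, hg, hc]
  | cons d t =>
      by_cases hd : d = c
      · subst hd
        rw [runDecomp, runDecomp]
        simp only [runBlock, List.flatMap_cons, List.takeWhile_cons, List.dropWhile_cons,
          beq_self_eq_true, if_true, List.length_cons]
        rw [show 1 + ((List.takeWhile (fun x => x == d) t).length + 1)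
            = (1 + (List.takeWhile (fun x => x == d) t).length) + 1 from by omega,
          List.replicate_succ]
        simp [hg, hc]
      · rw [runDecomp]
        have hb : (d == c) = false := by simp [hd]
        simp [runBlock, hg, hc, hb]

-- A's loop produces the untouched prefix plus the run decomposition of the suffix
lemma loop_eq : ∀ (s : List Char) (score : List Int) (idx : Nat), score.length = s.length →
    ntScoreLoop s score idx = score.take idx ++ (runDecomp (s.drop idx)).flatMap runBlock := by
  intro s score idx
  induction score, idx using ntScoreLoop.induct (s := s) with
  | case1 score idx h hG hg ih =>
      intro hlen
      have hg_eq := ntScoreRun_eq s 'G' (idx + 1)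
      have htw := length_takeWhile_le' (· == 'G') (s.drop (idx + 1))
      rw [List.length_drop] at htw
      have hbound : idx + ntScoreRun s 'G' (idx + 1) + 1 ≤ s.length := by omega
      rw [ntScoreLoop, dif_pos h, if_pos hG, if_pos hg]
      have hA := foldl_set_range score idx (ntScoreRun s 'G' (idx + 1) + 1)
        ((ntScoreRun s 'G' (idx + 1) : Int) + 1) (by omega)
      have hlen' : ((List.range (ntScoreRun s 'G' (idx + 1) + 1)).foldl
          (fun sc n => sc.set (idx + n) ((ntScoreRun s 'G' (idx + 1) : Int) + 1)) score).length = s.length := by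
        rw [hA]; simp [List.length_take, List.length_drop]; omega
      rw [ih hlen', hA]
      rw [List.take_left' (by simp [List.length_take]; omega)]
      rw [List.drop_eq_getElem_cons h, hG, runDecomp, dropWhile_eq_drop', List.drop_drop, ← hg_eq]
      rw [show idx + 1 + ntScoreRun s 'G' (idx + 1) = idx + ntScoreRun s 'G' (idx + 1) + 1 from by omega]
      simp only [List.flatMap_cons, List.append_assoc]
      congr 1
      rw [show (1 : Nat) + ntScoreRun s 'G' (idx + 1) = ntScoreRun s 'G' (idx + 1) + 1 from by omega]
      unfold runBlock
      congr 2
      push_cast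
      omega
  | case2 score idx h hG hg ih =>
      intro hlen
      have hg_eq := ntScoreRun_eq s 'G' (idx + 1)
      have htw := length_takeWhile_le' (· == 'G') (s.drop (idx + 1))
      rw [List.length_drop] at htw
      have hbound : idx + ntScoreRun s 'G' (idx + 1) + 1 ≤ s.length := by omega
      rw [ntScoreLoop, dif_pos h, if_pos hG, if_neg hg]
      have hA := foldl_set_range score idx (ntScoreRun s 'G' (idx + 1) + 1)
        ((4 : Int)) (by omega)
      have hlen' : ((List.range (ntScoreRun s 'G' (idx + 1) + 1)).foldl
          (fun sc n => sc.set (idx + n) ((4 : Int))) score).length = s.length := by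
        rw [hA]; simp [List.length_take, List.length_drop]; omega
      rw [ih hlen', hA]
      rw [List.take_left' (by simp [List.length_take]; omega)]
      rw [List.drop_eq_getElem_cons h, hG, runDecomp, dropWhile_eq_drop', List.drop_drop, ← hg_eq]
      rw [show idx + 1 + ntScoreRun s 'G' (idx + 1) = idx + ntScoreRun s 'G' (idx + 1) + 1 from by omega]
      simp only [List.flatMap_cons, List.append_assoc]
      congr 1
      rw [show (1 : Nat) + ntScoreRun s 'G' (idx + 1) = ntScoreRun s 'G' (idx + 1) + 1 from by omega]
      unfold runBlock
      congr 2
      push_cast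
      omega
  | case3 score idx h hG hC hg ih =>
      intro hlen
      have hg_eq := ntScoreRun_eq s 'C' (idx + 1)
      have htw := length_takeWhile_le' (· == 'C') (s.drop (idx + 1))
      rw [List.length_drop] at htw
      have hbound : idx + ntScoreRun s 'C' (idx + 1) + 1 ≤ s.length := by omega
      rw [ntScoreLoop, dif_pos h, if_neg hG, if_pos hC, if_pos hg]
      have hA := foldl_set_range score idx (ntScoreRun s 'C' (idx + 1) + 1)
        (-((ntScoreRun s 'C' (idx + 1) : Int) + 1)) (by omega)
      have hlen' : ((List.range (ntScoreRun s 'C' (idx + 1) + 1)).foldl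
          (fun sc n => sc.set (idx + n) (-((ntScoreRun s 'C' (idx + 1) : Int) + 1))) score).length = s.length := by
        rw [hA]; simp [List.length_take, List.length_drop]; omega
      rw [ih hlen', hA]
      rw [List.take_left' (by simp [List.length_take]; omega)]
      rw [List.drop_eq_getElem_cons h, hC, runDecomp, dropWhile_eq_drop', List.drop_drop, ← hg_eq]
      rw [show idx + 1 + ntScoreRun s 'C' (idx + 1) = idx + ntScoreRun s 'C' (idx + 1) + 1 from by omega]
      simp only [List.flatMap_cons, List.append_assoc]
      congr 1
      rw [show (1 : Nat) + ntScoreRun s 'C' (idx + 1) = ntScoreRun s 'C' (idx + 1) + 1 from by omega]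
      unfold runBlock
      simp only [if_neg (by decide : ¬ ('C' = 'G'))]
      congr 2
      push_cast
      omega
  | case4 score idx h hG hC hg ih =>
      intro hlen
      have hg_eq := ntScoreRun_eq s 'C' (idx + 1)
      have htw := length_takeWhile_le' (· == 'C') (s.drop (idx + 1))
      rw [List.length_drop] at htw
      have hbound : idx + ntScoreRun s 'C' (idx + 1) + 1 ≤ s.length := by omega
      rw [ntScoreLoop, dif_pos h, if_neg hG, if_pos hC, if_neg hg]
      have hA := foldl_set_range score idx (ntScoreRun s 'C' (idx + 1) + 1)
        ((-4 : Int)) (by omega)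
      have hlen' : ((List.range (ntScoreRun s 'C' (idx + 1) + 1)).foldl
          (fun sc n => sc.set (idx + n) ((-4 : Int))) score).length = s.length := by
        rw [hA]; simp [List.length_take, List.length_drop]; omega
      rw [ih hlen', hA]
      rw [List.take_left' (by simp [List.length_take]; omega)]
      rw [List.drop_eq_getElem_cons h, hC, runDecomp, dropWhile_eq_drop', List.drop_drop, ← hg_eq]
      rw [show idx + 1 + ntScoreRun s 'C' (idx + 1) = idx + ntScoreRun s 'C' (idx + 1) + 1 from by omega]
      simp only [List.flatMap_cons, List.append_assoc]
      congr 1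
      rw [show (1 : Nat) + ntScoreRun s 'C' (idx + 1) = ntScoreRun s 'C' (idx + 1) + 1 from by omega]
      unfold runBlock
      simp only [if_neg (by decide : ¬ ('C' = 'G'))]
      congr 2
      push_cast
      omega
  | case5 score idx h hG hC ih =>
      intro hlen
      rw [ntScoreLoop, dif_pos h, if_neg hG, if_neg hC]
      have hlen' : (score.set idx 0).length = s.length := by simp [hlen]
      rw [ih hlen', List.set_eq_take_cons_drop 0 (by omega)]
      rw [show List.take idx score ++ (0 : Int) :: List.drop (idx + 1) score
          = (List.take idx score ++ [(0 : Int)]) ++ List.drop (idx + 1) score from by simp]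
      rw [List.take_left' (by simp [List.length_take]; omega)]
      rw [List.drop_eq_getElem_cons h, runDecomp_flat_other s[idx] _ hG hC]
      simp
  | case6 score idx h =>
      intro hlen
      rw [ntScoreLoop, dif_neg h, List.drop_eq_nil_of_le (by omega),
        List.take_of_length_le (by omega)]
      simp [runDecomp]

-- B's run-building fold over a nonempty accumulator only touches the last run
lemma foldl_step_append (l : List Char) : ∀ (rs rs' : List (Char × Nat)), rs' ≠ [] →
    l.foldl ntScoreStep (rs ++ rs') = rs ++ l.foldl ntScoreStep rs' := by
  induction l with
  | nil => intro rs rs' h; simp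
  | cons ch t ih =>
      intro rs rs' h
      rcases List.eq_nil_or_concat rs' with rfl | ⟨ys, a, rfl⟩
      · exact absurd rfl h
      · obtain ⟨c, n⟩ := a
        simp only [List.foldl_cons, List.concat_eq_append]
        have hstep : ntScoreStep (rs ++ (ys ++ [(c, n)])) ch
            = rs ++ ntScoreStep (ys ++ [(c, n)]) ch := by
          unfold ntScoreStep
          rw [← List.append_assoc, List.getLast?_concat, List.getLast?_concat]
          by_cases hc : c = ch <;>
            simp [hc, List.append_assoc]
        rw [hstep]
        have hne : ntScoreStep (ys ++ [(c, n)]) ch ≠ [] := by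
          unfold ntScoreStep
          rw [List.getLast?_concat]
          by_cases hc : c = ch <;> simp [hc]
        exact ih _ _ hne

lemma foldl_step_single (l : List Char) : ∀ (c : Char) (n : Nat),
    l.foldl ntScoreStep [(c, n)]
      = (c, n + (l.takeWhile (· == c)).length) :: runDecomp (l.dropWhile (· == c)) := by
  induction l with
  | nil => intro c n; simp [runDecomp]
  | cons d t ih =>
      intro c n
      simp only [List.foldl_cons]
      by_cases hd : c = d
      · subst hd
        have : ntScoreStep [(c, n)] c = [(c, n + 1)] := by
          unfold ntScoreStep; simp
        rw [this, ih]
        simp [Nat.add_assoc]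
        omega
      · have hb : (d == c) = false := by simp [Ne.symm hd]
        have : ntScoreStep [(c, n)] d = [(c, n), (d, 1)] := by
          unfold ntScoreStep; simp [hd]
        rw [this, show [(c, n), (d, 1)] = [(c, n)] ++ [(d, 1)] from rfl,
          foldl_step_append t [(c, n)] [(d, 1)] (by simp), ih]
        simp only [List.takeWhile_cons, List.dropWhile_cons, hb, Bool.false_eq_true,
          if_false, List.length_nil, Nat.add_zero]
        rw [runDecomp]
        simp

lemma runs_eq (l : List Char) : l.foldl ntScoreStep [] = runDecomp l := by
  cases l with
  | nil => simp [runDecomp]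
  | cons c t =>
      simp only [List.foldl_cons]
      have : ntScoreStep [] c = [(c, 1)] := by unfold ntScoreStep; simp
      rw [this, foldl_step_single, runDecomp, Nat.add_comm]

-- ===== VERDICT (by name: the statement is the Claim_ definition above) =====
theorem ntScore_spec : Claim_equal_ntScore := by
  intro seq _
  unfold Spec_ntScore ntScore ntScore_alt
  rw [loop_eq _ _ _ (by simp), runs_eq]
  simp only [List.take_zero, List.drop_zero, List.nil_append]
  have h2 := PySem.List.foldl_append_eq_flatMap runBlock (runDecomp seq.toList) []
  simp only [List.nil_append] at h2
  rw [← h2]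
  simp [runBlock]
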